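-- pv_equiv track=rewrite | github.com/cmb1705/LITRIS | src/analysis/gap_detection.py | _collapse_year_ranges
-- ===== SOURCE A (Python) =====
-- def _collapse_year_ranges(years: list[int]) -> list[dict]:
--     if not years:
--         return []
--     years = sorted(years)
--     ranges = []
--     start = prev = years[0]
--     for year in years[1:]:
--         if year == prev + 1:
--             prev = year
--             continue
--         ranges.append({"start": start, "end": prev, "length": prev - start + 1})
--         start = prev = year
--     ranges.append({"start": start, "end": prev, "length": prev - start + 1})
--     return ranges
-- ===== SOURCE B (Python) =====
-- def _collapse_year_ranges(years: list[int]) -> list[dict]: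
--     ys = sorted(years)
--     if not ys:
--         return []
--     breaks = [(a, b) for a, b in zip(ys, ys[1:]) if b != a + 1]
--     starts = [ys[0]] + [b for _, b in breaks]
--     ends = [a for a, _ in breaks] + [ys[-1]]
--     return [{"start": s, "end": e, "length": e - s + 1} for s, e in zip(starts, ends)]
-- ===== Notes on version B (the rewrite author's own statement) =====
-- stated objective: simpler
-- what changed: Replaced A's stateful loop carrying start/prev/ranges by stateless comprehensions: break pairs come from zip(ys, ys[1:]) and the ranges from zipping the derived start and end lists.
import Mathlib
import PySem

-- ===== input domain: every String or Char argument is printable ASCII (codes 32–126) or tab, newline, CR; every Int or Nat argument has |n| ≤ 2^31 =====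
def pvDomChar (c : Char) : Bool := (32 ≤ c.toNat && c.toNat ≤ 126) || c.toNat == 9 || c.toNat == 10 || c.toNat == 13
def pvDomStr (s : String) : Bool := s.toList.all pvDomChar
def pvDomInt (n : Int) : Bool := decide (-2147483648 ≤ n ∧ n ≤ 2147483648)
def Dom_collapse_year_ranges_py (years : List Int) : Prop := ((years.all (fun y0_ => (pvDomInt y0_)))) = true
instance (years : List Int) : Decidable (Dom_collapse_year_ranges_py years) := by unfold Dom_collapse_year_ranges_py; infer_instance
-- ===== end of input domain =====

-- B replaces A's stateful start/prev loop by a pairwise-break comprehension over zip(ys, ys[1:]) (objective: simpler).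

-- ===== PORT A =====
-- A's for-loop over years[1:] with mutable start/prev/ranges, transliterated as structural recursion.
def cyrLoopA (rest : List Int) (start prev : Int) (ranges : List (List (String × Int))) :
    List (List (String × Int)) :=
  match rest with
  | [] => ranges ++ [[("start", start), ("end", prev), ("length", prev - start + 1)]]
  | year :: rest' =>
    if year = prev + 1 then cyrLoopA rest' start year ranges
    else cyrLoopA rest' year year
      (ranges ++ [[("start", start), ("end", prev), ("length", prev - start + 1)]])

def collapse_year_ranges_py (years : List Int) : List (List (String × Int)) :=
  if years = [] then []
  else
    match PySem.List.sorted years (fun x => x) false with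
    | [] => []  -- unreachable: sorted of a nonempty list is nonempty (years[0] never raises)
    | h :: t => cyrLoopA t h h []   -- start = prev = years[0]; loop over years[1:]

-- ===== PORT B =====
def collapse_year_ranges_py_alt (years : List Int) : List (List (String × Int)) :=
  match PySem.List.sorted years (fun x => x) false with
  | [] => []                       -- `if not ys: return []`
  | h :: t =>                      -- nonempty ys = h :: t, so ys[0] = h, ys[1:] = t, ys[-1] = last
    let brks := ((h :: t).zip t).filter (fun p => p.2 ≠ p.1 + 1)
    let starts := h :: brks.map Prod.snd
    let ends := brks.map Prod.fst ++ [(h :: t).getLast (by simp)]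
    (starts.zip ends).map (fun p =>
      [("start", p.1), ("end", p.2), ("length", p.2 - p.1 + 1)])

-- ===== PRECONDITION & SPEC =====
def Spec_collapse_year_ranges_py (years : List Int) (out : List (List (String × Int))) : Prop := out = collapse_year_ranges_py_alt years
instance (years : List Int) (out : List (List (String × Int))) : Decidable (Spec_collapse_year_ranges_py years out) := by unfold Spec_collapse_year_ranges_py; infer_instance

-- ===== CLAIM (what is proved, stated in full; the proofs are below) =====
def Claim_equal_collapse_year_ranges_py : Prop := ∀ (years : List Int), Dom_collapse_year_ranges_py years → Spec_collapse_year_ranges_py years (collapse_year_ranges_py years)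

-- ===== LEMMAS AND PROOFS =====

-- Key invariant: A's loop, started at (start, prev) with accumulator acc, produces acc ++ the
-- ranges B computes from the break pairs of prev :: t (whose first comparison is prev vs t[0]).
theorem cyrLoopA_eq (t : List Int) : ∀ (start prev : Int) (acc : List (List (String × Int))),
    cyrLoopA t start prev acc =
      acc ++ ((start :: (((prev :: t).zip t).filter (fun p => p.2 ≠ p.1 + 1)).map Prod.snd).zip
              ((((prev :: t).zip t).filter (fun p => p.2 ≠ p.1 + 1)).map Prod.fst
                ++ [(prev :: t).getLast (by simp)])).map (fun p =>
        [("start", p.1), ("end", p.2), ("length", p.2 - p.1 + 1)]) := by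
  induction t with
  | nil => intro start prev acc; simp [cyrLoopA]
  | cons y t' ih =>
    intro start prev acc
    by_cases hy : y = prev + 1
    · simp only [cyrLoopA, if_pos hy, ih, List.zip_cons_cons, List.filter_cons,
        decide_eq_true_eq]
      have : ¬ (y ≠ prev + 1) := by simpa using hy
      simp [this, List.getLast_cons]
    · simp only [cyrLoopA, if_neg hy, ih, List.zip_cons_cons, List.filter_cons,
        decide_eq_true_eq]
      simp [hy, List.getLast_cons, List.append_assoc]

-- ===== VERDICT (by name: the statement is the Claim_ definition above) =====
theorem collapse_year_ranges_py_spec : Claim_equal_collapse_year_ranges_py := by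
  intro years _
  unfold Spec_collapse_year_ranges_py collapse_year_ranges_py collapse_year_ranges_py_alt
  by_cases hy : years = []
  · subst hy; rfl
  · rw [if_neg hy]
    cases hs : PySem.List.sorted years (fun x => x) false with
    | nil => rfl
    | cons h t => simpa using cyrLoopA_eq t h h []
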